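-- pv_equiv track=rewrite | github.com/fabdel20/TP3-DeCryptii- | tp3.py | decodePolygramCipher
-- ===== SOURCE A (Python) =====
-- def codeWordShift(word, codeWord):
--     word = word.replace(" ", "")
--     result = ""
--     for i in range(len(word)):
--         letter = word[i]
--         length = len(codeWord)
--         if i >= length:
--             newI = i % length
--             replaceLetter = codeWord[newI]
--             result += replaceLetter
--         elif i <= length-1:
--             rLetter = codeWord[i]
--             result += rLetter
--     return result
--
-- def decodePolygramCipher(message, codeWord):
--     codeWordString = codeWordShift(message, codeWord)
--     cWord = message
--     message = (message.replace(" ", "")).lower()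
--     result = ""
--     alphabet = 'abcdefghijklmnopqrstuvwxyz'
--     spacedResult = ""
--     strippedWord = ""
--     for i in range(len(message)):
--         c = message[i]
--         if c in alphabet:
--             strippedWord += c
--     for i in range(len(strippedWord)):
--         letter = strippedWord[i]
--         if letter in alphabet:
--             numWord = alphabet.index(letter)
--             numShift = alphabet.index(codeWordString[i])
--             newIndex = numWord - numShift
--             if newIndex < 0:
--                 newIndex += 26
--             result += alphabet[newIndex]
--
--     listCWord = list(cWord)
--     listResult = list(result)
--     for i in range(len(listCWord)):
--         var = listCWord[i]
--         if var.lower() not in alphabet: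
--             spacedResult += var
--             listResult.insert(i, var)
--         else:
--             if var.isupper():
--                 spacedResult += listResult[i].upper()
--             else:
--                 spacedResult += listResult[i]
--     return spacedResult
-- ===== SOURCE B (Python) =====
-- def decodePolygramCipher(message, codeWord):
--     alphabet = 'abcdefghijklmnopqrstuvwxyz'
--     out = []
--     j = 0
--     for ch in message:
--         low = ch.lower()
--         if low in alphabet:
--             shift = alphabet.index(codeWord[j % len(codeWord)])
--             dec = alphabet[(alphabet.index(low) - shift) % 26]
--             out.append(dec.upper() if ch.isupper() else dec)
--             j += 1
--         else:
--             out.append(ch)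
--     return ''.join(out)
-- ===== Notes on version B (the rewrite author's own statement) =====
-- stated objective: faster
-- what changed: B decodes in a single pass over the original message with an inline letter counter for the keystream index, replacing A's four passes (building a repeated-codeword string, stripping to letters, decoding the stripped word, then re-interleaving non-letters with quadratic list.insert).
import Mathlib
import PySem

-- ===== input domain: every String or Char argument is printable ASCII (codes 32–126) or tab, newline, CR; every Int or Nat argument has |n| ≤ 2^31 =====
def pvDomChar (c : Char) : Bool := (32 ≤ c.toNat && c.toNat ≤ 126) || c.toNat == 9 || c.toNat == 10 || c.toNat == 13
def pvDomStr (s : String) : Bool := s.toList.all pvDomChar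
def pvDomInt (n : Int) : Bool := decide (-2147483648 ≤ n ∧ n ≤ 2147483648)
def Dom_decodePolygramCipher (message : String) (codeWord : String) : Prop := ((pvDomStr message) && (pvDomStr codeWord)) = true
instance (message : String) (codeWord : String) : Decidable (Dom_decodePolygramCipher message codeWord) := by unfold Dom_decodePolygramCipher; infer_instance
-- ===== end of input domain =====

-- B replaces A's four passes (keystream string, strip, decode, reinsert with quadratic list.insert)
-- by one pass over the message with an inline keystream counter; return value only, no mutation.

-- ===== PORT A =====
-- the Python alphabet literal; single-character 'c in alphabet' is list membership
def pvAlphabet : List Char := "abcdefghijklmnopqrstuvwxyz".toList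

def codeWordShiftPV (word : List Char) (codeWord : List Char) : List Char :=
  let word := PySem.Chars.replace word [' '] []        -- word.replace(" ", "")
  (List.range word.length).foldl
    (fun result i =>
      let length := codeWord.length
      if i ≥ length then
        let newI := i % length                          -- Python raises ZeroDivisionError when length = 0 (outside Pre_)
        result ++ [codeWord.getD newI ' ']              -- codeWord[newI], in range on the non-raising path
      else if i ≤ length - 1 then
        result ++ [codeWord.getD i ' ']                 -- codeWord[i]
      else result) []

def decodePolygramCipher (message : String) (codeWord : String) : String :=
  let codeWordString := codeWordShiftPV message.toList codeWord.toList
  let cWord := message.toList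
  let msg := PySem.Chars.lower (PySem.Chars.replace message.toList [' '] [])
  let strippedWord := (List.range msg.length).foldl
    (fun s i => let c := msg.getD i ' '; if c ∈ pvAlphabet then s ++ [c] else s) []
  let result := (List.range strippedWord.length).foldl
    (fun r i =>
      let letter := strippedWord.getD i ' '
      if letter ∈ pvAlphabet then
        let numWord : Int := ((PySem.List.index? pvAlphabet letter).getD 0 : Nat)            -- alphabet.index(letter): found on this branch
        let numShift : Int := ((PySem.List.index? pvAlphabet (codeWordString.getD i ' ')).getD 0 : Nat)
          -- alphabet.index(codeWordString[i]): Python raises ValueError when absent (outside Pre_)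
        let newIndex := numWord - numShift
        let newIndex := if newIndex < 0 then newIndex + 26 else newIndex
        r ++ [PySem.List.pyGetD pvAlphabet newIndex ' ']
      else r) []
  let st := (List.range cWord.length).foldl
    (fun (st : List Char × List Char) i =>
      let var := cWord.getD i ' '
      if PySem.Chars.lowerChar var ∉ pvAlphabet then
        (st.1 ++ [var], PySem.List.insert st.2 (i : Int) var)
      else if PySem.Chars.isupper var then
        (st.1 ++ [PySem.Chars.upperChar (st.2.getD i ' ')], st.2)
      else
        (st.1 ++ [st.2.getD i ' '], st.2)) ([], result)
  String.ofList st.1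

-- ===== PORT B =====
def altGo (cw : List Char) (j : Nat) : List Char → List Char
  | [] => []
  | ch :: rest =>
    let low := PySem.Chars.lowerChar ch
    if low ∈ pvAlphabet then
      let shift : Int := ((PySem.List.index? pvAlphabet (cw.getD (j % cw.length) ' ')).getD 0 : Nat)
        -- alphabet.index(codeWord[j % len(codeWord)]): Python raises outside Pre_
      let dec := PySem.List.pyGetD pvAlphabet
        (PySem.Int.mod ((((PySem.List.index? pvAlphabet low).getD 0 : Nat) : Int) - shift) 26) ' '
      (if PySem.Chars.isupper ch then PySem.Chars.upperChar dec else dec) :: altGo cw (j + 1) rest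
    else ch :: altGo cw j rest

def decodePolygramCipher_alt (message : String) (codeWord : String) : String :=
  String.ofList (altGo codeWord.toList 0 message.toList)

-- ===== PRECONDITION & SPEC =====
-- Pre_ excludes exactly the inputs where A raises: ZeroDivisionError (empty codeWord with any
-- non-space character in the message) and ValueError (a keystream position used for some letter
-- of the message holds a character outside 'a'..'z').
-- the letter test A and B both apply (c.lower() in alphabet)
def isAlPV (c : Char) : Bool := decide (PySem.Chars.lowerChar c ∈ pvAlphabet)

def Pre_decodePolygramCipher (message : String) (codeWord : String) : Prop :=
  (codeWord.toList = [] → ∀ c ∈ message.toList, c = ' ') ∧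
  ∀ j < min ((message.toList.filter isAlPV).length) codeWord.toList.length,
    codeWord.toList.getD j ' ' ∈ pvAlphabet
instance (message : String) (codeWord : String) : Decidable (Pre_decodePolygramCipher message codeWord) := by
  unfold Pre_decodePolygramCipher; infer_instance

def pvWitness_decodePolygramCipher : String × String := ("Hi there, World!", "key")

def Spec_decodePolygramCipher (message : String) (codeWord : String) (out : String) : Prop := out = decodePolygramCipher_alt message codeWord
instance (message : String) (codeWord : String) (out : String) : Decidable (Spec_decodePolygramCipher message codeWord out) := by unfold Spec_decodePolygramCipher; infer_instance

-- ===== CLAIM (what is proved, stated in full; the proofs are below) =====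
def Claim_equal_decodePolygramCipher : Prop := ∀ (message : String) (codeWord : String), Dom_decodePolygramCipher message codeWord → Pre_decodePolygramCipher message codeWord → Spec_decodePolygramCipher message codeWord (decodePolygramCipher message codeWord)

-- ===== LEMMAS AND PROOFS =====

def decCharPV (cw : List Char) (j : Nat) (c : Char) : Char :=
  PySem.List.pyGetD pvAlphabet
    (PySem.Int.mod ((((PySem.List.index? pvAlphabet c).getD 0 : Nat) : Int) -
      (((PySem.List.index? pvAlphabet (cw.getD (j % cw.length) ' ')).getD 0 : Nat) : Int)) 26) ' '
def decFromPV (cw : List Char) (j : Nat) : List Char → List Char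
  | [] => []
  | c :: cs => decCharPV cw j c :: decFromPV cw (j + 1) cs
def cilvPV : List Char → List Char → List Char
  | [], _ => []
  | c :: cs, R =>
    if PySem.Chars.lowerChar c ∈ pvAlphabet then
      (if PySem.Chars.isupper c then PySem.Chars.upperChar (R.headD ' ') else R.headD ' ') :: cilvPV cs R.tail
    else c :: cilvPV cs R
def ilvPV : List Char → List Char → List Char
  | [], R => R
  | c :: cs, R =>
    if PySem.Chars.lowerChar c ∈ pvAlphabet then R.headD ' ' :: ilvPV cs R.tail
    else c :: ilvPV cs R

theorem repl_go (fuel : Nat) : ∀ (l acc : List Char), l.length ≤ fuel →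
    PySem.Chars.replace.go [' '] [] fuel l acc = acc.reverse ++ l.filter (fun x => !decide (x = ' ')) := by
  induction fuel with
  | zero =>
    intro l acc h
    have : l = [] := List.eq_nil_of_length_eq_zero (by omega)
    subst this; simp [PySem.Chars.replace.go]
  | succ n ih =>
    intro l acc h
    match l with
    | [] => simp [PySem.Chars.replace.go]
    | c :: t =>
      rw [PySem.Chars.replace.go]
      by_cases hc : c = ' '
      · subst hc
        simp only [List.isPrefixOf, BEq.rfl, Bool.true_and, if_true]
        simp only [List.length_cons, List.drop_succ_cons, List.reverse_nil,
          List.nil_append, List.length_nil, List.drop_zero]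
        rw [ih t _ (by simpa using h)]
        simp
      · have hp : ([' '].isPrefixOf (c :: t)) = false := by
          simp [List.isPrefixOf]; exact fun h' => absurd h'.symm hc
        rw [hp]
        simp only [Bool.false_eq_true, if_false]
        rw [ih t _ (by simpa using h)]
        simp [hc]

theorem repl_eq (cs : List Char) :
    PySem.Chars.replace cs [' '] [] = cs.filter (fun x => !decide (x = ' ')) := by
  have := repl_go cs.length cs [] (le_refl _)
  simpa [PySem.Chars.replace] using this


theorem codeWordShiftPV_eq (word cw : List Char) :
    codeWordShiftPV word cw =
      (List.range (word.filter (fun x => !decide (x = ' '))).length).map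
        (fun i => cw.getD (i % cw.length) ' ') := by
  unfold codeWordShiftPV
  rw [repl_eq]
  have hstep : (fun (result : List Char) (i : Nat) =>
      let length := cw.length
      if i ≥ length then
        let newI := i % length
        result ++ [cw.getD newI ' ']
      else if i ≤ length - 1 then
        result ++ [cw.getD i ' ']
      else result)
      = fun result i => result ++ [cw.getD (i % cw.length) ' '] := by
    funext r i
    by_cases h1 : i ≥ cw.length
    · simp [h1]
    · have hlt : i < cw.length := by omega
      have h2 : i ≤ cw.length - 1 := by omega
      simp [h1, h2, Nat.mod_eq_of_lt hlt]
  rw [hstep, PySem.List.foldl_append_singleton_eq_map]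
  simp

theorem strippedWord_eq (msgL : List Char) :
    (PySem.Chars.lower (PySem.Chars.replace msgL [' '] [])).filter (fun c => decide (c ∈ pvAlphabet)) =
      (msgL.filter isAlPV).map PySem.Chars.lowerChar := by
  rw [repl_eq]
  simp only [PySem.Chars.lower, List.filter_map, List.filter_filter]
  congr 1
  apply List.filter_congr
  intro c _
  by_cases h : c = ' '
  · subst h; simp [isAlPV]; decide
  · simp [isAlPV, Function.comp, h]


theorem foldl_range'_getD {α β : Type} (l : List α) (d : α) (f : β → α → β) :
    ∀ (S P : List α) (init : β), l = P ++ S →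
    (List.range' P.length S.length 1).foldl (fun s i => f s (l.getD i d)) init = S.foldl f init := by
  intro S
  induction S with
  | nil => intro P init h; simp
  | cons c S' ih =>
    intro P init h
    simp only [List.length_cons]
    rw [List.range'_succ]
    simp only [List.foldl_cons]
    have hget : l.getD P.length d = c := by
      rw [List.getD_eq_getElem?_getD, h, List.getElem?_append_right (le_refl _)]
      simp
    rw [hget]
    have := ih (P ++ [c]) (f init c) (by simp [h])
    simpa using this

theorem foldl_range_getD {α β : Type} (l : List α) (d : α) (f : β → α → β) (init : β) :
    (List.range l.length).foldl (fun s i => f s (l.getD i d)) init = l.foldl f init := by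
  rw [List.range_eq_range']
  exact foldl_range'_getD l d f l [] init rfl

theorem altGo_eq (cw : List Char) : ∀ (msg : List Char) (j : Nat),
    altGo cw j msg = cilvPV msg (decFromPV cw j ((msg.filter isAlPV).map PySem.Chars.lowerChar)) := by
  intro msg
  induction msg with
  | nil => intro j; simp [altGo, cilvPV]
  | cons ch rest ih =>
    intro j
    by_cases h : PySem.Chars.lowerChar ch ∈ pvAlphabet
    · simp only [altGo, cilvPV, List.filter_cons, isAlPV, h, decide_true, if_true, List.map_cons,
        decFromPV, List.headD_cons, List.tail_cons]
      exact congrArg _ (ih (j + 1))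
    · simp only [altGo, cilvPV, List.filter_cons, isAlPV, h, decide_false, if_false,
        Bool.false_eq_true]
      exact congrArg _ (ih j)

theorem decStep_eq (cw : List Char) (j : Nat) (c : Char) (hc : c ∈ pvAlphabet)
    (hs : cw.getD (j % cw.length) ' ' ∈ pvAlphabet) :
    (let numWord : Int := ((PySem.List.index? pvAlphabet c).getD 0 : Nat)
     let numShift : Int := ((PySem.List.index? pvAlphabet (cw.getD (j % cw.length) ' ')).getD 0 : Nat)
     let newIndex := numWord - numShift
     PySem.List.pyGetD pvAlphabet (if newIndex < 0 then newIndex + 26 else newIndex) ' ')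
    = decCharPV cw j c := by
  obtain ⟨a, ha⟩ := Option.isSome_iff_exists.mp ((PySem.List.index?_isSome_iff _ _).mpr hc)
  obtain ⟨b, hb⟩ := Option.isSome_iff_exists.mp ((PySem.List.index?_isSome_iff _ _).mpr hs)
  obtain ⟨hka, -⟩ := PySem.List.getElem_of_index?_eq_some ha
  obtain ⟨hkb, -⟩ := PySem.List.getElem_of_index?_eq_some hb
  have h26 : pvAlphabet.length = 26 := by decide
  rw [h26] at hka hkb
  unfold decCharPV
  simp only [ha, hb, Option.getD_some]
  congr 1
  rw [PySem.Int.mod_eq_emod_of_pos (by norm_num)]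
  omega

theorem resultLoop (cw sw cs : List Char)
    (hmem : ∀ c ∈ sw, c ∈ pvAlphabet)
    (hcs : ∀ i < sw.length, cs.getD i ' ' = cw.getD (i % cw.length) ' ' ∧
      cw.getD (i % cw.length) ' ' ∈ pvAlphabet) :
    ∀ (ls P : List Char) (init : List Char), sw = P ++ ls →
    (List.range' P.length ls.length 1).foldl
      (fun r i =>
        let letter := sw.getD i ' '
        if letter ∈ pvAlphabet then
          let numWord : Int := ((PySem.List.index? pvAlphabet letter).getD 0 : Nat)
          let numShift : Int := ((PySem.List.index? pvAlphabet (cs.getD i ' ')).getD 0 : Nat)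
          let newIndex := numWord - numShift
          let newIndex := if newIndex < 0 then newIndex + 26 else newIndex
          r ++ [PySem.List.pyGetD pvAlphabet newIndex ' ']
        else r) init
      = init ++ decFromPV cw P.length ls := by
  intro ls
  induction ls with
  | nil => intro P init h; simp [decFromPV]
  | cons c ls' ih =>
    intro P init h
    have hlt : P.length < sw.length := by simp [h]
    have hget : sw.getD P.length ' ' = c := by
      rw [List.getD_eq_getElem?_getD, h, List.getElem?_append_right (le_refl _)]
      simp
    obtain ⟨hcs1, hcs2⟩ := hcs P.length hlt
    have hc : c ∈ pvAlphabet := hmem c (by simp [h])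
    simp only [List.length_cons]
    rw [List.range'_succ]
    simp only [List.foldl_cons, hget, hcs1, hc, if_true]
    have hstep := decStep_eq cw P.length c hc hcs2
    simp only at hstep
    rw [hstep]
    have := ih (P ++ [c]) (init ++ [decCharPV cw P.length c]) (by simp [h])
    simp only [List.length_append, List.length_cons, List.length_nil, Nat.zero_add] at this
    rw [this]
    simp [decFromPV]

theorem spacedLoop (msgL : List Char) :
    ∀ (S P X R spaced : List Char), msgL = P ++ S → X.length = P.length →
      S.countP isAlPV ≤ R.length →
    (List.range' P.length S.length 1).foldl
      (fun (st : List Char × List Char) i =>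
        let var := msgL.getD i ' '
        if PySem.Chars.lowerChar var ∉ pvAlphabet then
          (st.1 ++ [var], PySem.List.insert st.2 (i : Int) var)
        else if PySem.Chars.isupper var then
          (st.1 ++ [PySem.Chars.upperChar (st.2.getD i ' ')], st.2)
        else (st.1 ++ [st.2.getD i ' '], st.2)) (spaced, X ++ R)
      = (spaced ++ cilvPV S R, X ++ ilvPV S R) := by
  intro S
  induction S with
  | nil => intro P X R spaced h hX hcount; simp [cilvPV, ilvPV]
  | cons c S' ih =>
    intro P X R spaced h hX hcount
    have hget : msgL.getD P.length ' ' = c := by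
      rw [List.getD_eq_getElem?_getD, h, List.getElem?_append_right (le_refl _)]
      simp
    simp only [List.length_cons]
    rw [List.range'_succ]
    simp only [List.foldl_cons, hget]
    by_cases hal : PySem.Chars.lowerChar c ∈ pvAlphabet
    · -- letter branch: listResult untouched, split moves one to the left
      have hR : R ≠ [] := by
        intro hR0
        rw [hR0] at hcount
        simp only [List.countP_cons, isAlPV, hal, decide_true, if_true, List.length_nil] at hcount
        omega
      obtain ⟨r, R', rfl⟩ := List.exists_cons_of_ne_nil hR
      have hgetR : (X ++ r :: R').getD P.length ' ' = r := by
        rw [List.getD_eq_getElem?_getD, ← hX, List.getElem?_append_right (le_refl _)]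
        simp
      simp only [hal, not_true_eq_false, if_false, hgetR]
      by_cases hup : PySem.Chars.isupper c = true
      · simp only [hup, if_true]
        have := ih (P ++ [c]) (X ++ [r]) R' (spaced ++ [PySem.Chars.upperChar r])
          (by simp [h]) (by simp [hX]) (by simpa [List.countP_cons, isAlPV, hal] using hcount)
        simp only [List.length_append, List.length_cons, List.length_nil, Nat.zero_add,
          List.append_assoc, List.cons_append, List.nil_append] at this
        rw [this]
        simp [cilvPV, ilvPV, hal, hup]
      · simp only [hup, if_false, Bool.false_eq_true]
        have := ih (P ++ [c]) (X ++ [r]) R' (spaced ++ [r])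
          (by simp [h]) (by simp [hX]) (by simpa [List.countP_cons, isAlPV, hal] using hcount)
        simp only [List.length_append, List.length_cons, List.length_nil, Nat.zero_add,
          List.append_assoc, List.cons_append, List.nil_append] at this
        rw [this]
        simp [cilvPV, ilvPV, hal, hup]
    · -- non-letter branch: insert at the split point
      have hins : PySem.List.insert (X ++ R) ((P.length : Nat) : Int) c = X ++ c :: R := by
        rw [← hX, PySem.List.insert_natCast _ _ _ (by simp)]
        simp
      simp only [hal, not_false_eq_true, if_true, hins]
      have := ih (P ++ [c]) (X ++ [c]) R (spaced ++ [c])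
        (by simp [h]) (by simp [hX]) (by simpa [List.countP_cons, isAlPV, hal] using hcount)
      simp only [List.length_append, List.length_cons, List.length_nil, Nat.zero_add,
        List.append_assoc, List.cons_append, List.nil_append] at this ⊢
      rw [this]
      simp [cilvPV, ilvPV, hal]


theorem length_decFromPV (cw : List Char) : ∀ (j : Nat) (ls : List Char),
    (decFromPV cw j ls).length = ls.length := by
  intro j ls
  induction ls generalizing j with
  | nil => simp [decFromPV]
  | cons c cs ih => simp [decFromPV, ih]

theorem main (m cw : String) (hpre : Pre_decodePolygramCipher m cw) :
    decodePolygramCipher m cw = decodePolygramCipher_alt m cw := by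
  obtain ⟨hpre1, hpre2⟩ := hpre
  simp only [decodePolygramCipher, decodePolygramCipher_alt]
  rw [altGo_eq]
  rw [codeWordShiftPV_eq]
  -- strippedWord
  rw [foldl_range_getD (PySem.Chars.lower (PySem.Chars.replace m.toList [' '] [])) ' '
    (fun s c => if c ∈ pvAlphabet then s ++ [c] else s)]
  rw [PySem.List.foldl_append_ite_eq_filter]
  rw [strippedWord_eq]
  set SW := (m.toList.filter isAlPV).map PySem.Chars.lowerChar with hSW
  -- coverage facts
  have hcount : SW.length = m.toList.countP isAlPV := by
    simp [hSW, ← List.countP_eq_length_filter]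
  have hle : SW.length ≤ (m.toList.filter (fun x => !decide (x = ' '))).length := by
    rw [hcount, ← List.countP_eq_length_filter]
    exact List.countP_mono_left (fun c _ hc => by
      by_contra hsp
      simp only [Bool.not_eq_true, Bool.not_eq_false', decide_eq_true_eq] at hsp
      subst hsp
      exact absurd hc (by decide))
  have hmem : ∀ c ∈ SW, c ∈ pvAlphabet := by
    intro c hc
    rw [hSW] at hc
    obtain ⟨c', hc', rfl⟩ := List.mem_map.mp hc
    have := (List.mem_filter.mp hc').2
    simpa [isAlPV] using this
  have hLpos : ∀ i < SW.length, 0 < cw.toList.length := by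
    intro i hi
    rcases Nat.eq_zero_or_pos cw.toList.length with h0 | h; swap; · exact h
    exfalso
    have hcw : cw.toList = [] := List.eq_nil_of_length_eq_zero h0
    have hall := hpre1 hcw
    have : m.toList.filter isAlPV = [] := by
      apply List.filter_eq_nil_iff.mpr
      intro c hc
      rw [hall c hc]
      decide
    rw [hSW] at hi
    simp [this] at hi
  have hshift : ∀ i < SW.length, cw.toList.getD (i % cw.toList.length) ' ' ∈ pvAlphabet := by
    intro i hi
    have hpos := hLpos i hi
    have hiSW : i < (m.toList.filter isAlPV).length := by
      rw [hSW] at hi; simpa using hi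
    apply hpre2
    by_cases hc : cw.toList.length ≤ (m.toList.filter isAlPV).length
    · have := Nat.mod_lt i hpos
      omega
    · rw [Nat.mod_eq_of_lt (by omega)]
      omega
  have hcs : ∀ i < SW.length,
      ((List.range (List.filter (fun x => !decide (x = ' ')) m.toList).length).map
        (fun i => cw.toList.getD (i % cw.toList.length) ' ')).getD i ' ' =
          cw.toList.getD (i % cw.toList.length) ' ' ∧
        cw.toList.getD (i % cw.toList.length) ' ' ∈ pvAlphabet := by
    intro i hi
    constructor
    · rw [List.getD_eq_getElem?_getD, List.getElem?_map, List.getElem?_range (by omega)]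
      rfl
    · exact hshift i hi
  have hres := resultLoop cw.toList SW
    ((List.range (List.filter (fun x => !decide (x = ' ')) m.toList).length).map
      (fun i => cw.toList.getD (i % cw.toList.length) ' '))
    hmem hcs SW [] [] rfl
  simp only [List.length_nil, List.nil_append] at hres
  rw [← List.range_eq_range'] at hres
  simp only [List.nil_append]
  rw [hres]
  -- third loop
  have hsp := spacedLoop m.toList m.toList [] [] (decFromPV cw.toList 0 SW) []
    (by simp) rfl (by rw [length_decFromPV, hcount])
  simp only [List.length_nil, List.nil_append] at hsp
  rw [← List.range_eq_range'] at hsp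
  rw [hsp]


-- ===== VERDICT (by name: the statement is the Claim_ definition above) =====
theorem decodePolygramCipher_spec : Claim_equal_decodePolygramCipher := by
  intro m cw _ hpre
  unfold Spec_decodePolygramCipher
  exact main m cw hpre
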